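-- pv_equiv track=rewrite | github.com/antonpetkoff/Programming101 | Programming101/week0/is_an_bn.py | is_an_bn
-- ===== SOURCE A (Python) =====
-- def is_an_bn(word):
--     if len(word) == 0:
--         return True
--     if len(word) < 2:
--         return False
--     if len(word) % 2 != 0:
--         return False
--     for i in range(len(word)//2):
--         if word[i] != "a":
--             return False
--         if word[len(word)-i-1] != "b":
--             return False
--     return True
-- ===== SOURCE B (Python) =====
-- from itertools import groupby
--
--
-- def is_an_bn(word):
--     runs = [(c, len(list(g))) for c, g in groupby(word)]
--     if not runs:
--         return True
--     if len(runs) != 2: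
--         return False
--     (c1, n1), (c2, n2) = runs
--     return c1 == "a" and c2 == "b" and n1 == n2
-- ===== Notes on version B (the rewrite author's own statement) =====
-- stated objective: simpler
-- what changed: Replaced the positional first-half/last-half index loop with a run-length grouping (itertools.groupby): the word is a^n b^n iff it is empty or collapses to exactly two runs ('a', n) and ('b', n) of equal length.
import Mathlib
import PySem

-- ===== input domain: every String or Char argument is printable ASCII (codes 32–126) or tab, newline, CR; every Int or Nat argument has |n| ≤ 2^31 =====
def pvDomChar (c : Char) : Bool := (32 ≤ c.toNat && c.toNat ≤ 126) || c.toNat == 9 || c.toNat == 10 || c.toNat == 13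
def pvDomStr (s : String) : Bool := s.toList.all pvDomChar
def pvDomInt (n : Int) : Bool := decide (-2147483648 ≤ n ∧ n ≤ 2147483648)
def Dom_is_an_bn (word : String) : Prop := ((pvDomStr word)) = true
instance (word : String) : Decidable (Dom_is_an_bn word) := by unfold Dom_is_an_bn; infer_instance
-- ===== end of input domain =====

-- B replaces A's positional first-half/last-half index loop by a run-length collapse
-- (groupby): the word is a^n b^n iff it is empty or is exactly two runs ('a',n), ('b',n).

-- ===== PORT A =====
-- the 'for i in range(len(word)//2)' loop with its two early returns
-- (indices are always in range here, so the 'none' arm of pyGet? is unreachable)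
def pvALoop (l : List Char) (n : Int) : List Int → Bool
  | [] => true
  | i :: rest =>
    if PySem.List.pyGet? l i ≠ some 'a' then false
    else if PySem.List.pyGet? l (n - i - 1) ≠ some 'b' then false
    else pvALoop l n rest

def is_an_bn (word : String) : Bool :=
  let l := word.toList
  let n : Int := (l.length : Int)
  if n = 0 then true
  else if n < 2 then false
  else if PySem.Int.mod n 2 ≠ 0 then false
  else pvALoop l n (PySem.List.pyRange 0 (PySem.Int.floordiv n 2) 1)

-- ===== PORT B =====
-- port of the groupby comprehension: consecutive runs as (char, run length) pairs
def pvRuns : List Char → List (Char × Int)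
  | [] => []
  | c :: rest =>
    match pvRuns rest with
    | (d, k) :: t => if c = d then (c, k + 1) :: t else (c, 1) :: (d, k) :: t
    | [] => [(c, 1)]

def is_an_bn_alt (word : String) : Bool :=
  match pvRuns word.toList with
  | [] => true
  | [(c1, n1), (c2, n2)] => c1 = 'a' && c2 = 'b' && n1 = n2
  | _ => false

-- ===== PRECONDITION & SPEC =====
def Spec_is_an_bn (word : String) (out : Bool) : Prop := out = is_an_bn_alt word
instance (word : String) (out : Bool) : Decidable (Spec_is_an_bn word out) := by unfold Spec_is_an_bn; infer_instance

-- ===== CLAIM (what is proved, stated in full; the proofs are below) =====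
def Claim_equal_is_an_bn : Prop := ∀ (word : String), Dom_is_an_bn word → Spec_is_an_bn word (is_an_bn word)

-- ===== LEMMAS AND PROOFS =====

-- the common characterization: the word is a^k b^k for some k
def pvIsAnBn (l : List Char) : Prop := ∃ k : Nat, l = List.replicate k 'a' ++ List.replicate k 'b'

-- ---- B side ----

theorem pvRuns_sound (l : List Char) :
    (∀ p ∈ pvRuns l, 1 ≤ p.2) ∧ l = (pvRuns l).flatMap (fun p => List.replicate p.2.toNat p.1) := by
  induction l with
  | nil => simp [pvRuns]
  | cons c rest ih =>
    obtain ⟨hpos, hflat⟩ := ih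
    cases h : pvRuns rest with
    | nil =>
      simp [h] at hflat
      simp [pvRuns, hflat]
    | cons p t =>
      obtain ⟨d, k⟩ := p
      have hk : 1 ≤ k := hpos (d, k) (by simp [h])
      by_cases hcd : c = d
      · subst hcd
        refine ⟨?_, ?_⟩
        · intro q hq
          have hq' : q ∈ (c, k + 1) :: t := by
            simpa [pvRuns, h] using hq
          rcases List.mem_cons.mp hq' with hq' | hq'
          · subst hq'; simpa using by omega
          · exact hpos q (h ▸ List.mem_cons_of_mem _ hq')
        · have hkn : (k + 1).toNat = k.toNat + 1 := by omega
          rw [h] at hflat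
          simp only [List.flatMap_cons] at hflat
          simp only [pvRuns, h]
          simp only [if_pos, List.flatMap_cons, hkn,
            List.replicate_succ, List.cons_append]
          exact congrArg (c :: ·) hflat
      · refine ⟨?_, ?_⟩
        · intro q hq
          have hq' : q ∈ (c, (1:Int)) :: (d, k) :: t := by
            simpa [pvRuns, h, hcd] using hq
          rcases List.mem_cons.mp hq' with hq' | hq'
          · subst hq'; simp
          rcases List.mem_cons.mp hq' with hq' | hq'
          · subst hq'; exact hk
          · exact hpos q (h ▸ List.mem_cons_of_mem _ hq')
        · simp only [pvRuns, h, if_neg hcd, List.flatMap_cons]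
          rw [h] at hflat
          simp only [List.flatMap_cons] at hflat
          simpa using congrArg (c :: ·) hflat

theorem pvRuns_rep_b (k : Nat) (hk : 1 ≤ k) :
    pvRuns (List.replicate k 'b') = [('b', (k : Int))] := by
  induction k with
  | zero => omega
  | succ m ih =>
    by_cases hm : 1 ≤ m
    · have := ih hm
      simp only [List.replicate_succ, pvRuns, this]
      norm_num
    · have : m = 0 := by omega
      subst this
      simp [pvRuns]

theorem pvRuns_rep_ab (j k : Nat) (hj : 1 ≤ j) (hk : 1 ≤ k) :
    pvRuns (List.replicate j 'a' ++ List.replicate k 'b') = [('a', (j : Int)), ('b', (k : Int))] := by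
  induction j with
  | zero => omega
  | succ m ih =>
    by_cases hm : 1 ≤ m
    · have := ih hm
      simp only [List.replicate_succ, List.cons_append, pvRuns, this]
      norm_num
    · have : m = 0 := by omega
      subst this
      simp [pvRuns, pvRuns_rep_b k hk]

theorem alt_iff (word : String) : is_an_bn_alt word = true ↔ pvIsAnBn word.toList := by
  constructor
  · intro h
    unfold is_an_bn_alt at h
    obtain ⟨hpos, hflat⟩ := pvRuns_sound word.toList
    cases hr : pvRuns word.toList with
    | nil =>
      rw [hr] at hflat; simp at hflat
      exact ⟨0, by simp [hflat]⟩
    | cons p t =>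
      obtain ⟨c1, n1⟩ := p
      cases t with
      | nil => rw [hr] at h; simp at h
      | cons q t2 =>
        obtain ⟨c2, n2⟩ := q
        cases t2 with
        | cons r t3 => rw [hr] at h; simp at h
        | nil =>
          rw [hr] at h
          simp only [Bool.and_eq_true, decide_eq_true_eq] at h
          obtain ⟨⟨hc1, hc2⟩, hn⟩ := h
          rw [hr] at hflat
          refine ⟨n1.toNat, ?_⟩
          rw [hflat]
          simp [hc1, hc2, hn]
  · rintro ⟨k, hl⟩
    by_cases hk : 1 ≤ k
    · unfold is_an_bn_alt
      rw [hl, pvRuns_rep_ab k k hk hk]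
      simp
    · have : k = 0 := by omega
      subst this
      simp at hl
      unfold is_an_bn_alt
      rw [hl]
      simp [pvRuns]

-- ---- A side ----

theorem pvALoop_all (l : List Char) (n : Int) (idxs : List Int) :
    pvALoop l n idxs =
      idxs.all (fun i =>
        decide (PySem.List.pyGet? l i = some 'a') &&
        decide (PySem.List.pyGet? l (n - i - 1) = some 'b')) := by
  induction idxs with
  | nil => rfl
  | cons i rest ih =>
    simp only [pvALoop, List.all_cons]
    split_ifs with h1 h2
    · simp [h1]
    · simp [h2]
    · simp only [not_not] at h1 h2
      simp [h1, h2, ih]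

theorem a_iff (word : String) : is_an_bn word = true ↔ pvIsAnBn word.toList := by
  set l := word.toList with hl
  unfold is_an_bn
  by_cases h0 : l.length = 0
  · have hnil : l = [] := List.eq_nil_of_length_eq_zero h0
    rw [← hl]
    simp [hnil, pvIsAnBn]
  by_cases hodd : l.length % 2 = 1
  · have hlt : ¬ ((l.length : Int) = 0) := by omega
    rw [← hl, if_neg hlt]
    have hmod : PySem.Int.mod (l.length : Int) 2 = ((l.length % 2 : Nat) : Int) :=
      PySem.Int.mod_natCast l.length 2
    by_cases h1 : (l.length : Int) < 2
    · rw [if_pos h1]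
      constructor
      · intro h; exact absurd h (by simp)
      · rintro ⟨k, hk⟩
        have := congrArg List.length hk
        simp at this
        omega
    · rw [if_neg h1, if_pos (by rw [hmod]; omega)]
      constructor
      · intro h; exact absurd h (by simp)
      · rintro ⟨k, hk⟩
        have := congrArg List.length hk
        simp at this
        omega
  · -- even, nonzero length: l.length = 2 * m with 1 ≤ m
    obtain ⟨m, hm⟩ : ∃ m : Nat, l.length = 2 * m := ⟨l.length / 2, by omega⟩
    have hm1 : 1 ≤ m := by omega
    have hne : ¬ ((l.length : Int) = 0) := by omega
    have hnlt : ¬ ((l.length : Int) < 2) := by omega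
    have hmod : PySem.Int.mod (l.length : Int) 2 = ((l.length % 2 : Nat) : Int) :=
      PySem.Int.mod_natCast l.length 2
    have hdiv : PySem.Int.floordiv (l.length : Int) 2 = ((l.length / 2 : Nat) : Int) :=
      PySem.Int.floordiv_natCast l.length 2
    rw [← hl, if_neg hne, if_neg hnlt, if_neg (by rw [hmod]; omega)]
    rw [hdiv, pvALoop_all]
    have hhalf : l.length / 2 = m := by omega
    rw [hhalf, PySem.List.pyRange_one]
    simp only [sub_zero, Int.toNat_natCast, zero_add, List.all_map, List.all_eq_true,
      Function.comp_apply, Bool.and_eq_true, decide_eq_true_eq, List.mem_range]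
    constructor
    · intro hall
      refine ⟨m, ?_⟩
      apply List.ext_getElem?
      intro j
      by_cases hj : j < 2 * m
      · have hrep : (List.replicate m 'a' ++ List.replicate m 'b')[j]? =
            some (if j < m then 'a' else 'b') := by
          by_cases hjm : j < m
          · rw [List.getElem?_append_left (by simpa using hjm)]
            simp [hjm]
          · rw [List.getElem?_append_right (by simpa using hjm)]
            simp only [List.length_replicate, List.getElem?_replicate]
            rw [if_pos (by omega), if_neg hjm]
        rw [hrep]
        by_cases hjm : j < m
        · have := (hall j hjm).1
          rw [PySem.List.pyGet?_natCast] at this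
          rw [this, if_pos hjm]
        · have hi : 2 * m - 1 - j < m := by omega
          have := (hall (2 * m - 1 - j) hi).2
          have harg : ((l.length : Int) - ((2 * m - 1 - j : Nat) : Int) - 1) = ((j : Nat) : Int) := by
            push_cast [hm]; omega
          rw [harg, PySem.List.pyGet?_natCast] at this
          rw [this, if_neg hjm]
      · rw [List.getElem?_eq_none (by omega), List.getElem?_eq_none (by simp; omega)]
    · rintro ⟨k, hk⟩ i him
      have hlen := congrArg List.length hk
      simp at hlen
      have hkm : k = m := by omega
      constructor
      · rw [PySem.List.pyGet?_natCast, hk, List.getElem?_append_left (by simp; omega)]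
        simp only [List.getElem?_replicate]
        rw [if_pos (by omega)]
      · have harg : ((l.length : Int) - (i : Int) - 1) = ((2 * m - 1 - i : Nat) : Int) := by
          push_cast [hm]; omega
        rw [harg, PySem.List.pyGet?_natCast, hk,
          List.getElem?_append_right (by simp; omega)]
        simp only [List.length_replicate, List.getElem?_replicate]
        rw [if_pos (by omega)]

-- ===== VERDICT (by name: the statement is the Claim_ definition above) =====
theorem is_an_bn_spec : Claim_equal_is_an_bn := by
  intro word _
  unfold Spec_is_an_bn
  have ha := a_iff word
  have hb := alt_iff word
  cases h1 : is_an_bn word <;> cases h2 : is_an_bn_alt word <;>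
    simp_all
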